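-- pv_equiv track=rewrite | github.com/PckyDev/SpireNetwork-CircuitData | verifyCircuitIntegrity.py | _coerce_type_name
-- ===== SOURCE A (Python) =====
-- def _coerce_type_name(type_names):
--     if not isinstance(type_names, list) or not type_names:
--         return "any"
--
--     preferred_order = ("bool", "int", "float", "string", "text", "vector3", "exec")
--     for preferred_type in preferred_order:
--         if preferred_type in type_names:
--             return preferred_type
--
--     return type_names[0]
-- ===== SOURCE B (Python) =====
-- def _coerce_type_name(type_names):
--     if not isinstance(type_names, list) or not type_names:
--         return "any"
--
--     preferred_order = ("bool", "int", "float", "string", "text", "vector3", "exec")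
--     rank = {name: i for i, name in enumerate(preferred_order)}
--     best_rank = 7
--     best_name = None
--     for name in type_names:
--         r = rank.get(name, 7)
--         if r < best_rank:
--             best_rank = r
--             best_name = name
--     return best_name if best_name is not None else type_names[0]
-- ===== Notes on version B (the rewrite author's own statement) =====
-- stated objective: alternative
-- what changed: Replaces the seven membership scans over type_names (one per preferred name) by a prebuilt name-to-rank dict and a single pass over type_names keeping the member with the smallest rank.
import Mathlib
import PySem

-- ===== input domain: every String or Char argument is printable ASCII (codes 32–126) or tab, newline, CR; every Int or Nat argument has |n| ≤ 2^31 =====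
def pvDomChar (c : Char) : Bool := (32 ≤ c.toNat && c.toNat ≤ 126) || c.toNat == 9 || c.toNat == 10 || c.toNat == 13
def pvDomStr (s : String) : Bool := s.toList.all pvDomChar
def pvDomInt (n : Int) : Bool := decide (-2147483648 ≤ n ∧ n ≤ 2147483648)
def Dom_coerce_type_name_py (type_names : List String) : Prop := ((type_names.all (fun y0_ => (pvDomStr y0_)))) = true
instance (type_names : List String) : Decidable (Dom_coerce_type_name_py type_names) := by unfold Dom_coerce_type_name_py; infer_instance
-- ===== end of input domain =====

-- B replaces A's seven membership scans by a rank dict and one pass keeping the smallest-rank member (alternative decomposition, same observable result).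

-- ===== PORT A =====
def coerce_type_name_py (type_names : List String) : String :=
  match type_names with
  | [] => "any"  -- 'not type_names' guard (isinstance is always true under the type convention)
  | x :: _ =>
    -- for preferred_type in preferred_order: if preferred_type in type_names: return preferred_type
    match (["bool", "int", "float", "string", "text", "vector3", "exec"].find?
            (fun p => type_names.contains p)) with
    | some p => p
    | none => x  -- return type_names[0]

-- ===== PORT B =====
def pvPreferred : List String := ["bool", "int", "float", "string", "text", "vector3", "exec"]

-- rank = {name: i for i, name in enumerate(preferred_order)}
def pvRank : PySem.Dict String Int :=
  (PySem.List.enumerate pvPreferred).foldl (fun d p => d.insert p.2 p.1) PySem.Dict.empty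

-- loop body: r = rank.get(name, 7); if r < best_rank: best_rank, best_name = r, name
def pvStep (st : Int × Option String) (name : String) : Int × Option String :=
  let r := pvRank.getD name 7
  if r < st.1 then (r, some name) else st

def coerce_type_name_py_alt (type_names : List String) : String :=
  match type_names with
  | [] => "any"
  | x :: _ =>
    let p := type_names.foldl pvStep (7, none)
    match p.2 with
    | some n => n
    | none => x  -- best_name is None: return type_names[0]

-- ===== PRECONDITION & SPEC =====
def Spec_coerce_type_name_py (type_names : List String) (out : String) : Prop := out = coerce_type_name_py_alt type_names
instance (type_names : List String) (out : String) : Decidable (Spec_coerce_type_name_py type_names out) := by unfold Spec_coerce_type_name_py; infer_instance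

-- ===== CLAIM (what is proved, stated in full; the proofs are below) =====
def Claim_equal_coerce_type_name_py : Prop := ∀ (type_names : List String), Dom_coerce_type_name_py type_names → Spec_coerce_type_name_py type_names (coerce_type_name_py type_names)

-- ===== LEMMAS AND PROOFS =====

theorem pvRank_char (s : String) :
    pvRank.getD s 7 =
      if s = "bool" then 0 else if s = "int" then 1 else if s = "float" then 2
      else if s = "string" then 3 else if s = "text" then 4 else if s = "vector3" then 5
      else if s = "exec" then 6 else 7 := by
  simp only [pvRank, pvPreferred, PySem.List.enumerate_cons, PySem.List.enumerate_nil,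
    List.foldl_cons, List.foldl_nil, PySem.Dict.getD_insert, PySem.Dict.getD_empty]
  split_ifs <;> simp_all

theorem pvRank_le (s : String) : pvRank.getD s 7 ≤ 7 := by
  rw [pvRank_char]; split_ifs <;> omega

theorem pvFold_inv (l : List String) : ∀ (b : Int) (o : Option String),
    (∀ n, o = some n → pvRank.getD n 7 = b ∧ b < 7) → (o = none → b = 7) →
    (∀ n, (l.foldl pvStep (b, o)).2 = some n →
        pvRank.getD n 7 = (l.foldl pvStep (b, o)).1 ∧ (l.foldl pvStep (b, o)).1 < 7 ∧
        (n ∈ l ∨ o = some n)) ∧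
    ((l.foldl pvStep (b, o)).2 = none → (l.foldl pvStep (b, o)).1 = 7) ∧
    (l.foldl pvStep (b, o)).1 ≤ b ∧
    (∀ s ∈ l, (l.foldl pvStep (b, o)).1 ≤ pvRank.getD s 7) := by
  induction l with
  | nil =>
    intro b o h1 h2
    exact ⟨fun n hn => ⟨(h1 n hn).1, (h1 n hn).2, Or.inr hn⟩, h2, le_refl _, by simp⟩
  | cons x xs ih =>
    intro b o h1 h2
    simp only [List.foldl_cons]
    by_cases hlt : pvRank.getD x 7 < b
    · have hstep : pvStep (b, o) x = (pvRank.getD x 7, some x) := by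
        simp [pvStep, hlt]
      rw [hstep]
      obtain ⟨I1, I2, I3, I4⟩ := ih (pvRank.getD x 7) (some x)
        (by rintro n rfl2; injection rfl2 with h; subst h
            exact ⟨rfl, lt_of_lt_of_le hlt (by rcases o with _ | n' <;> [exact le_of_eq (h2 rfl); exact le_of_lt (h1 n' rfl).2])⟩)
        (by intro h; cases h)
      refine ⟨?_, I2, le_trans I3 hlt.le, ?_⟩
      · intro n hn
        obtain ⟨j1, j2, j3⟩ := I1 n hn
        refine ⟨j1, j2, ?_⟩
        rcases j3 with h | h
        · exact Or.inl (List.mem_cons_of_mem _ h)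
        · injection h with h; subst h; exact Or.inl List.mem_cons_self
      · intro s hs
        rcases List.mem_cons.mp hs with rfl | hs
        · exact I3
        · exact I4 s hs
    · have hstep : pvStep (b, o) x = (b, o) := by simp [pvStep, hlt]
      rw [hstep]
      obtain ⟨I1, I2, I3, I4⟩ := ih b o h1 h2
      refine ⟨?_, I2, I3, ?_⟩
      · intro n hn
        obtain ⟨j1, j2, j3⟩ := I1 n hn
        exact ⟨j1, j2, j3.imp (List.mem_cons_of_mem _) id⟩
      · intro s hs
        rcases List.mem_cons.mp hs with rfl | hs
        · exact le_trans I3 (not_lt.mp hlt)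
        · exact I4 s hs

theorem pvFind_spec (l : List String) (k : Nat) (hk : k < 7)
    (hmem : (pvPreferred[k]'(by simp [pvPreferred]; omega)) ∈ l)
    (hnot : ∀ j (hj : j < k), (pvPreferred[j]'(by simp [pvPreferred]; omega)) ∉ l) :
    List.find? (fun p => l.contains p) pvPreferred =
      some (pvPreferred[k]'(by simp [pvPreferred]; omega)) := by
  rw [List.find?_eq_some_iff_getElem]
  refine ⟨by simpa using hmem, k, by simp [pvPreferred]; omega, rfl, fun j hj => by simpa using hnot j hj⟩

-- ===== VERDICT (by name: the statement is the Claim_ definition above) =====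
theorem coerce_type_name_py_spec : Claim_equal_coerce_type_name_py := by
  intro tn _
  unfold Spec_coerce_type_name_py
  match tn with
  | [] => rfl
  | x :: rest =>
    simp only [coerce_type_name_py, coerce_type_name_py_alt]
    obtain ⟨I1, I2, _, I4⟩ := pvFold_inv (x :: rest) 7 none (by simp) (by simp)
    set p := (x :: rest).foldl pvStep (7, none) with hp
    rcases ho : p.2 with _ | n
    · -- no preferred name occurs: both sides return type_names[0]
      have h7 := I2 ho
      have hnot : ∀ s ∈ x :: rest, pvRank.getD s 7 = 7 := fun s hs =>
        le_antisymm (pvRank_le s) (h7 ▸ I4 s hs)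
      have hfind : (["bool", "int", "float", "string", "text", "vector3", "exec"].find?
          (fun p => (x :: rest).contains p)) = none := by
        rw [List.find?_eq_none]
        intro q hq
        simp only [List.mem_cons, List.not_mem_nil, or_false] at hq
        have hq7 : q ∉ x :: rest := by
          intro hqm
          have h7q := hnot q hqm
          rw [pvRank_char] at h7q
          rcases hq with rfl | rfl | rfl | rfl | rfl | rfl | rfl <;> simp at h7q
        simpa using hq7
      rw [hfind]
    · -- the best-ranked preferred name n was found
      obtain ⟨hr, hlt, hm⟩ := I1 n ho
      have hmem : n ∈ x :: rest := by
        rcases hm with h | h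
        · exact h
        · cases h
      have hge : 0 ≤ p.1 := by rw [← hr, pvRank_char]; split_ifs <;> omega
      have hnotmem : ∀ q : String, pvRank.getD q 7 < p.1 → q ∉ x :: rest := fun q hq hqm =>
        absurd (I4 q hqm) (not_le.mpr hq)
      have hcases : p.1 = 0 ∨ p.1 = 1 ∨ p.1 = 2 ∨ p.1 = 3 ∨ p.1 = 4 ∨ p.1 = 5 ∨ p.1 = 6 := by omega
      rcases hcases with h | h | h | h | h | h | h <;> rw [h] at hr
      · have hnv : n = "bool" := by
          rw [pvRank_char] at hr; split_ifs at hr <;> first | assumption | omega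
        subst hnv
        have hfind := pvFind_spec (x :: rest) 0 (by omega)
          (by simpa [pvPreferred] using hmem) (fun j hj => absurd hj (Nat.not_lt_zero j))
        have hfind' : (["bool", "int", "float", "string", "text", "vector3", "exec"].find?
            (fun p => (x :: rest).contains p)) = some "bool" := by
          simpa [pvPreferred] using hfind
        rw [hfind']
      · have hnv : n = "int" := by
          rw [pvRank_char] at hr; split_ifs at hr <;> first | assumption | omega
        subst hnv
        have hfind := pvFind_spec (x :: rest) 1 (by omega)
          (by simpa [pvPreferred] using hmem) (fun j hj => by
           interval_cases j <;> (apply hnotmem; rw [pvRank_char]; simp [pvPreferred]; omega))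
        have hfind' : (["bool", "int", "float", "string", "text", "vector3", "exec"].find?
            (fun p => (x :: rest).contains p)) = some "int" := by
          simpa [pvPreferred] using hfind
        rw [hfind']
      · have hnv : n = "float" := by
          rw [pvRank_char] at hr; split_ifs at hr <;> first | assumption | omega
        subst hnv
        have hfind := pvFind_spec (x :: rest) 2 (by omega)
          (by simpa [pvPreferred] using hmem) (fun j hj => by
           interval_cases j <;> (apply hnotmem; rw [pvRank_char]; simp [pvPreferred]; omega))
        have hfind' : (["bool", "int", "float", "string", "text", "vector3", "exec"].find?
            (fun p => (x :: rest).contains p)) = some "float" := by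
          simpa [pvPreferred] using hfind
        rw [hfind']
      · have hnv : n = "string" := by
          rw [pvRank_char] at hr; split_ifs at hr <;> first | assumption | omega
        subst hnv
        have hfind := pvFind_spec (x :: rest) 3 (by omega)
          (by simpa [pvPreferred] using hmem) (fun j hj => by
           interval_cases j <;> (apply hnotmem; rw [pvRank_char]; simp [pvPreferred]; omega))
        have hfind' : (["bool", "int", "float", "string", "text", "vector3", "exec"].find?
            (fun p => (x :: rest).contains p)) = some "string" := by
          simpa [pvPreferred] using hfind
        rw [hfind']
      · have hnv : n = "text" := by
          rw [pvRank_char] at hr; split_ifs at hr <;> first | assumption | omega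
        subst hnv
        have hfind := pvFind_spec (x :: rest) 4 (by omega)
          (by simpa [pvPreferred] using hmem) (fun j hj => by
           interval_cases j <;> (apply hnotmem; rw [pvRank_char]; simp [pvPreferred]; omega))
        have hfind' : (["bool", "int", "float", "string", "text", "vector3", "exec"].find?
            (fun p => (x :: rest).contains p)) = some "text" := by
          simpa [pvPreferred] using hfind
        rw [hfind']
      · have hnv : n = "vector3" := by
          rw [pvRank_char] at hr; split_ifs at hr <;> first | assumption | omega
        subst hnv
        have hfind := pvFind_spec (x :: rest) 5 (by omega)
          (by simpa [pvPreferred] using hmem) (fun j hj => by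
           interval_cases j <;> (apply hnotmem; rw [pvRank_char]; simp [pvPreferred]; omega))
        have hfind' : (["bool", "int", "float", "string", "text", "vector3", "exec"].find?
            (fun p => (x :: rest).contains p)) = some "vector3" := by
          simpa [pvPreferred] using hfind
        rw [hfind']
      · have hnv : n = "exec" := by
          rw [pvRank_char] at hr; split_ifs at hr <;> first | assumption | omega
        subst hnv
        have hfind := pvFind_spec (x :: rest) 6 (by omega)
          (by simpa [pvPreferred] using hmem) (fun j hj => by
           interval_cases j <;> (apply hnotmem; rw [pvRank_char]; simp [pvPreferred]; omega))
        have hfind' : (["bool", "int", "float", "string", "text", "vector3", "exec"].find?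
            (fun p => (x :: rest).contains p)) = some "exec" := by
          simpa [pvPreferred] using hfind
        rw [hfind']
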